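-- pv_equiv track=rewrite | github.com/jxman/aws-ssm-data-fetcher | aws_ssm_fetcher/processors/statistics_analyzer.py | _group_regions_geographically
-- ===== SOURCE A (Python) =====
-- from typing import Any, Dict, List, Optional, Tuple, Union
--
-- def _group_regions_geographically(regions: List[str]) -> Dict[str, List[str]]:
--     """Group regions by geographic location."""
--     geographic_groups = {
--         "US": [],
--         "Europe": [],
--         "Asia Pacific": [],
--         "Canada": [],
--         "South America": [],
--         "Africa": [],
--         "Middle East": [],
--         "Government": [],
--     }
--
--     for region in regions:
--         if region.startswith("us-"):
--             if "gov" in region: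
--                 geographic_groups["Government"].append(region)
--             else:
--                 geographic_groups["US"].append(region)
--         elif region.startswith("eu-"):
--             geographic_groups["Europe"].append(region)
--         elif region.startswith("ap-"):
--             geographic_groups["Asia Pacific"].append(region)
--         elif region.startswith("ca-"):
--             geographic_groups["Canada"].append(region)
--         elif region.startswith("sa-"):
--             geographic_groups["South America"].append(region)
--         elif region.startswith("af-"):
--             geographic_groups["Africa"].append(region)
--         elif region.startswith("me-") or region.startswith("il-"):
--             geographic_groups["Middle East"].append(region)
--         elif region.startswith("cn-"):
--             geographic_groups["Asia Pacific"].append(region)  # China regions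
--
--     # Remove empty groups
--     return {k: v for k, v in geographic_groups.items() if v}
-- ===== SOURCE B (Python) =====
-- from typing import Dict, List
--
-- _PREFIX_GROUP = {
--     "us-": "US",
--     "eu-": "Europe",
--     "ap-": "Asia Pacific",
--     "ca-": "Canada",
--     "sa-": "South America",
--     "af-": "Africa",
--     "me-": "Middle East",
--     "il-": "Middle East",
--     "cn-": "Asia Pacific",
-- }
--
-- _GROUP_ORDER = [
--     "US", "Europe", "Asia Pacific", "Canada",
--     "South America", "Africa", "Middle East", "Government",
-- ]
--
--
-- def _classify(region: str):
--     g = _PREFIX_GROUP.get(region[:3])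
--     if g == "US" and "gov" in region:
--         g = "Government"
--     return g
--
--
-- def _group_regions_geographically(regions: List[str]) -> Dict[str, List[str]]:
--     """Group regions by geographic location."""
--     result = {}
--     for group in _GROUP_ORDER:
--         members = [r for r in regions if _classify(r) == group]
--         if members:
--             result[group] = members
--     return result
-- ===== Notes on version B (the rewrite author's own statement) =====
-- stated objective: idiomatic
-- what changed: Replaces the per-region 8-way if/elif cascade mutating a pre-seeded dict with a static prefix->group lookup table plus a per-group filtering pass over the input, building only the non-empty groups in fixed order.
import Mathlib
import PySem

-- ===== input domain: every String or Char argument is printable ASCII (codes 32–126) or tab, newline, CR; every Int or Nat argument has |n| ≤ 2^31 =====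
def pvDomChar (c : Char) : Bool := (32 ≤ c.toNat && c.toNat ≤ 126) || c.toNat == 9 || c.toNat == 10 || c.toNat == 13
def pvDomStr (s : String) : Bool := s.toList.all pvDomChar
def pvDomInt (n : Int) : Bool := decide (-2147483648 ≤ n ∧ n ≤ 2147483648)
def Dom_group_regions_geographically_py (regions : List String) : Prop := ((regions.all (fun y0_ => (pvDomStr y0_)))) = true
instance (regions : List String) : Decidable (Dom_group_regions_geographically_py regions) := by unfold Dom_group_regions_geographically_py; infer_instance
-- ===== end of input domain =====

-- B replaces A's per-region 8-way if/elif cascade over a pre-seeded dict with a static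
-- prefix→group lookup table plus one filtering pass per group (idiomatic alternative, same cost).


-- ===== PORT A =====
-- one iteration of A's for-loop: the 8-way startswith cascade appending into the dict
def stepA (d : PySem.Dict String (List String)) (region : String) : PySem.Dict String (List String) :=
  if PySem.Str.startswith region "us-" then
    if PySem.Str.isIn "gov" region then d.modify "Government" [] (fun v => v ++ [region])
    else d.modify "US" [] (fun v => v ++ [region])
  else if PySem.Str.startswith region "eu-" then d.modify "Europe" [] (fun v => v ++ [region])
  else if PySem.Str.startswith region "ap-" then d.modify "Asia Pacific" [] (fun v => v ++ [region])
  else if PySem.Str.startswith region "ca-" then d.modify "Canada" [] (fun v => v ++ [region])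
  else if PySem.Str.startswith region "sa-" then d.modify "South America" [] (fun v => v ++ [region])
  else if PySem.Str.startswith region "af-" then d.modify "Africa" [] (fun v => v ++ [region])
  else if PySem.Str.startswith region "me-" || PySem.Str.startswith region "il-" then
    d.modify "Middle East" [] (fun v => v ++ [region])
  else if PySem.Str.startswith region "cn-" then d.modify "Asia Pacific" [] (fun v => v ++ [region])
  else d

def group_regions_geographically_py (regions : List String) : List (String × List String) :=
  let geographic_groups : PySem.Dict String (List String) := PySem.Dict.ofList
    [("US", []), ("Europe", []), ("Asia Pacific", []), ("Canada", []),
     ("South America", []), ("Africa", []), ("Middle East", []), ("Government", [])]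
  let final := regions.foldl stepA geographic_groups
  final.items.filter (fun kv => !kv.2.isEmpty)

-- ===== PORT B =====
def prefixGroup : PySem.Dict String String := PySem.Dict.ofList
  [("us-", "US"), ("eu-", "Europe"), ("ap-", "Asia Pacific"), ("ca-", "Canada"),
   ("sa-", "South America"), ("af-", "Africa"), ("me-", "Middle East"),
   ("il-", "Middle East"), ("cn-", "Asia Pacific")]

def groupOrder : List String :=
  ["US", "Europe", "Asia Pacific", "Canada", "South America", "Africa", "Middle East", "Government"]

def classifyB (region : String) : Option String :=
  let g := prefixGroup.get? (PySem.Str.slice region none (some 3))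
  if g == some "US" && PySem.Str.isIn "gov" region then some "Government" else g

def group_regions_geographically_py_alt (regions : List String) : List (String × List String) :=
  groupOrder.foldl (fun result group =>
    let members := regions.filter (fun r => classifyB r == some group)
    if members.isEmpty then result else result ++ [(group, members)]) []

-- ===== PRECONDITION & SPEC =====
def Spec_group_regions_geographically_py (regions : List String) (out : List (String × List String)) : Prop := out = group_regions_geographically_py_alt regions
instance (regions : List String) (out : List (String × List String)) : Decidable (Spec_group_regions_geographically_py regions out) := by unfold Spec_group_regions_geographically_py; infer_instance

-- ===== CLAIM (what is proved, stated in full; the proofs are below) =====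
def Claim_equal_group_regions_geographically_py : Prop := ∀ (regions : List String), Dom_group_regions_geographically_py regions → Spec_group_regions_geographically_py regions (group_regions_geographically_py regions)

-- ===== LEMMAS AND PROOFS =====

-- the group A's cascade sends a region to (none = no branch fires)
def targetA (r : String) : Option String :=
  if PySem.Str.startswith r "us-" then
    if PySem.Str.isIn "gov" r then some "Government" else some "US"
  else if PySem.Str.startswith r "eu-" then some "Europe"
  else if PySem.Str.startswith r "ap-" then some "Asia Pacific"
  else if PySem.Str.startswith r "ca-" then some "Canada"
  else if PySem.Str.startswith r "sa-" then some "South America"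
  else if PySem.Str.startswith r "af-" then some "Africa"
  else if PySem.Str.startswith r "me-" || PySem.Str.startswith r "il-" then some "Middle East"
  else if PySem.Str.startswith r "cn-" then some "Asia Pacific"
  else none

theorem stepA_eq (d : PySem.Dict String (List String)) (r : String) :
    stepA d r = match targetA r with
      | some k => d.modify k [] (fun v => v ++ [r])
      | none => d := by
  unfold stepA targetA
  split_ifs <;> rfl

theorem beq_toList (p q : String) : (p == q) = (p.toList == q.toList) := by
  rw [Bool.eq_iff_iff]
  simp only [beq_iff_eq]
  exact ⟨fun h => by rw [h], fun h => by have := congrArg String.ofList h; simpa using this⟩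

theorem sw (s p : String) : PySem.Str.startswith s p = (p.toList == s.toList.take p.toList.length) := by
  rw [show PySem.Str.startswith s p = p.toList.isPrefixOf s.toList from by
        simp [PySem.Str.startswith, PySem.Chars.startswith]]
  rw [Bool.eq_iff_iff]
  simp [List.isPrefixOf_iff_prefix, List.prefix_iff_eq_take]

theorem get?_prefixGroup (r : String) :
    prefixGroup.get? (PySem.Str.slice r none (some 3)) =
      (if PySem.Str.startswith r "us-" then some "US"
       else if PySem.Str.startswith r "eu-" then some "Europe"
       else if PySem.Str.startswith r "ap-" then some "Asia Pacific"
       else if PySem.Str.startswith r "ca-" then some "Canada"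
       else if PySem.Str.startswith r "sa-" then some "South America"
       else if PySem.Str.startswith r "af-" then some "Africa"
       else if PySem.Str.startswith r "me-" then some "Middle East"
       else if PySem.Str.startswith r "il-" then some "Middle East"
       else if PySem.Str.startswith r "cn-" then some "Asia Pacific"
       else none) := by
  have hkey : (PySem.Str.slice r none (some 3)).toList = r.toList.take 3 := by
    simp [PySem.Str.slice]
    have := PySem.List.slice_to_natCast (xs := r.toList) (b := 3)
    simpa using this
  rw [show prefixGroup = PySem.Dict.mk
    [("us-", "US"), ("eu-", "Europe"), ("ap-", "Asia Pacific"), ("ca-", "Canada"),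
     ("sa-", "South America"), ("af-", "Africa"), ("me-", "Middle East"),
     ("il-", "Middle East"), ("cn-", "Asia Pacific")] from rfl]
  simp only [PySem.Dict.get?_mk_cons, beq_toList, hkey, sw]
  rfl

@[simp] theorem classify_eq (r : String) : classifyB r = targetA r := by
  unfold classifyB targetA
  simp only [get?_prefixGroup]
  split_ifs <;> simp_all

theorem targetA_cases (r : String) :
    targetA r = none ∨ targetA r = some "US" ∨ targetA r = some "Europe" ∨
    targetA r = some "Asia Pacific" ∨ targetA r = some "Canada" ∨
    targetA r = some "South America" ∨ targetA r = some "Africa" ∨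
    targetA r = some "Middle East" ∨ targetA r = some "Government" := by
  unfold targetA; split_ifs <;> simp

theorem loopA (regions : List String) :
    ∀ l1 l2 l3 l4 l5 l6 l7 l8 : List String,
    List.foldl stepA (PySem.Dict.mk
      [("US", l1), ("Europe", l2), ("Asia Pacific", l3), ("Canada", l4),
       ("South America", l5), ("Africa", l6), ("Middle East", l7), ("Government", l8)]) regions
    = PySem.Dict.mk
      [("US", l1 ++ regions.filter (fun r => targetA r == some "US")),
       ("Europe", l2 ++ regions.filter (fun r => targetA r == some "Europe")),
       ("Asia Pacific", l3 ++ regions.filter (fun r => targetA r == some "Asia Pacific")),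
       ("Canada", l4 ++ regions.filter (fun r => targetA r == some "Canada")),
       ("South America", l5 ++ regions.filter (fun r => targetA r == some "South America")),
       ("Africa", l6 ++ regions.filter (fun r => targetA r == some "Africa")),
       ("Middle East", l7 ++ regions.filter (fun r => targetA r == some "Middle East")),
       ("Government", l8 ++ regions.filter (fun r => targetA r == some "Government"))] := by
  induction regions with
  | nil => simp
  | cons r rest ih =>
    intro l1 l2 l3 l4 l5 l6 l7 l8
    rw [List.foldl_cons, stepA_eq]
    rcases targetA_cases r with h | h | h | h | h | h | h | h | h
    · rw [h]
      simp only []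
      rw [ih]
      simp [List.filter_cons, h]
    · rw [h]
      show List.foldl stepA (PySem.Dict.mk [("US", l1 ++ [r]), ("Europe", l2), ("Asia Pacific", l3), ("Canada", l4), ("South America", l5), ("Africa", l6), ("Middle East", l7), ("Government", l8)]) rest = _
      rw [ih]
      simp [List.filter_cons, h]
    · rw [h]
      show List.foldl stepA (PySem.Dict.mk [("US", l1), ("Europe", l2 ++ [r]), ("Asia Pacific", l3), ("Canada", l4), ("South America", l5), ("Africa", l6), ("Middle East", l7), ("Government", l8)]) rest = _
      rw [ih]
      simp [List.filter_cons, h]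
    · rw [h]
      show List.foldl stepA (PySem.Dict.mk [("US", l1), ("Europe", l2), ("Asia Pacific", l3 ++ [r]), ("Canada", l4), ("South America", l5), ("Africa", l6), ("Middle East", l7), ("Government", l8)]) rest = _
      rw [ih]
      simp [List.filter_cons, h]
    · rw [h]
      show List.foldl stepA (PySem.Dict.mk [("US", l1), ("Europe", l2), ("Asia Pacific", l3), ("Canada", l4 ++ [r]), ("South America", l5), ("Africa", l6), ("Middle East", l7), ("Government", l8)]) rest = _
      rw [ih]
      simp [List.filter_cons, h]
    · rw [h]
      show List.foldl stepA (PySem.Dict.mk [("US", l1), ("Europe", l2), ("Asia Pacific", l3), ("Canada", l4), ("South America", l5 ++ [r]), ("Africa", l6), ("Middle East", l7), ("Government", l8)]) rest = _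
      rw [ih]
      simp [List.filter_cons, h]
    · rw [h]
      show List.foldl stepA (PySem.Dict.mk [("US", l1), ("Europe", l2), ("Asia Pacific", l3), ("Canada", l4), ("South America", l5), ("Africa", l6 ++ [r]), ("Middle East", l7), ("Government", l8)]) rest = _
      rw [ih]
      simp [List.filter_cons, h]
    · rw [h]
      show List.foldl stepA (PySem.Dict.mk [("US", l1), ("Europe", l2), ("Asia Pacific", l3), ("Canada", l4), ("South America", l5), ("Africa", l6), ("Middle East", l7 ++ [r]), ("Government", l8)]) rest = _
      rw [ih]
      simp [List.filter_cons, h]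
    · rw [h]
      show List.foldl stepA (PySem.Dict.mk [("US", l1), ("Europe", l2), ("Asia Pacific", l3), ("Canada", l4), ("South America", l5), ("Africa", l6), ("Middle East", l7), ("Government", l8 ++ [r])]) rest = _
      rw [ih]
      simp [List.filter_cons, h]

theorem foldl_groups (gs : List String) (F : String → List String) :
    ∀ acc : List (String × List String),
    gs.foldl (fun result group =>
      let members := F group
      if members.isEmpty then result else result ++ [(group, members)]) acc
    = acc ++ (gs.map (fun g => (g, F g))).filter (fun kv => !kv.2.isEmpty) := by
  induction gs with
  | nil => simp
  | cons g gs ih =>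
    intro acc
    rw [List.foldl_cons]
    by_cases h : (F g).isEmpty <;>
      simp only [h, if_true, if_false, Bool.false_eq_true] <;>
      rw [ih] <;> simp [List.filter_cons, h]

-- ===== VERDICT (by name: the statement is the Claim_ definition above) =====
theorem group_regions_geographically_py_spec : Claim_equal_group_regions_geographically_py := by
  intro regions _
  unfold Spec_group_regions_geographically_py
  unfold group_regions_geographically_py group_regions_geographically_py_alt
  simp only [classify_eq]
  have seed : (PySem.Dict.ofList
      [("US", ([] : List String)), ("Europe", []), ("Asia Pacific", []), ("Canada", []),
       ("South America", []), ("Africa", []), ("Middle East", []), ("Government", [])])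
      = PySem.Dict.mk
      [("US", []), ("Europe", []), ("Asia Pacific", []), ("Canada", []),
       ("South America", []), ("Africa", []), ("Middle East", []), ("Government", [])] := rfl
  rw [seed, loopA regions [] [] [] [] [] [] [] []]
  rw [groupOrder, foldl_groups]
  rfl
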